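-- pv_equiv track=rewrite | github.com/robotslacker/sqlcli | sqlcli/sqlparse.py | SQLFormatWithPrefix
-- ===== SOURCE A (Python) =====
-- def SQLFormatWithPrefix(p_szCommentSQLScript, p_szOutputPrefix=""):
--     # 如果是完全空行的内容，则跳过
--     if len(p_szCommentSQLScript) == 0:
--         return None
--
--     # 把所有的SQL换行, 第一行加入[SQL >]， 随后加入[   >]
--     m_FormattedString = None
--     m_CommentSQLLists = p_szCommentSQLScript.split('\n')
--     if len(p_szCommentSQLScript) >= 1:
--         # 如果原来的内容最后一个字符就是回车换行符，split函数会在后面补一个换行符，这里要去掉，否则前端显示就会多一个空格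
--         if p_szCommentSQLScript[-1] == "\n":
--             del m_CommentSQLLists[-1]
--
--     # 拼接字符串
--     bSQLPrefix = 'SQL> '
--     for pos in range(0, len(m_CommentSQLLists)):
--         if pos == 0:
--             m_FormattedString = p_szOutputPrefix + bSQLPrefix + m_CommentSQLLists[pos]
--         else:
--             m_FormattedString = \
--                 m_FormattedString + '\n' + p_szOutputPrefix + bSQLPrefix + m_CommentSQLLists[pos]
--         if len(m_CommentSQLLists[pos].strip()) != 0:
--             bSQLPrefix = '   > '
--     return m_FormattedString
-- ===== SOURCE B (Python) =====
-- def SQLFormatWithPrefix(p_szCommentSQLScript, p_szOutputPrefix=""):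
--     if len(p_szCommentSQLScript) == 0:
--         return None
--     lines = p_szCommentSQLScript.split('\n')
--     if p_szCommentSQLScript.endswith('\n'):
--         lines.pop()
--     # index of the first non-blank line; if all blank, past the end (prefix never switches)
--     switch = next((i for i, l in enumerate(lines) if l.strip()), len(lines))
--     return '\n'.join(
--         p_szOutputPrefix + ('SQL> ' if i <= switch else '   > ') + l
--         for i, l in enumerate(lines))
-- ===== Notes on version B (the rewrite author's own statement) =====
-- stated objective: simpler
-- what changed: Replaces the single stateful loop (mutable prefix flag + running string concatenation) by two independent passes: one scan finds the index of the first non-blank line, then a comprehension assigns each line its prefix by comparing its index to that boundary and joins once.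
import Mathlib
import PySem

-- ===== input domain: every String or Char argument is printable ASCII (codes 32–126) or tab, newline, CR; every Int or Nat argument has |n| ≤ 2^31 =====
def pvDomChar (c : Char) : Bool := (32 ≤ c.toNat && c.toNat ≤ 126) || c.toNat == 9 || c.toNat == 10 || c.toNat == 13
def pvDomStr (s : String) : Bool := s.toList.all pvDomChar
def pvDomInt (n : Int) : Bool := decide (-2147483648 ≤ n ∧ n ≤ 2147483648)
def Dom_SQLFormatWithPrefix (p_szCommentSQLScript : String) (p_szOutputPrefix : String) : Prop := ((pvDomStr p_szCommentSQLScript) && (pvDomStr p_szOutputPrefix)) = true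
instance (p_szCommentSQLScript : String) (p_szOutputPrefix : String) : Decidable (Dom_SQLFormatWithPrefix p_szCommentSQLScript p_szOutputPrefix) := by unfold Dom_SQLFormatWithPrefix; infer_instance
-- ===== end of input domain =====

-- B replaces A's single stateful loop (mutable prefix flag + running concatenation) by a scan
-- for the first non-blank line followed by an index-vs-boundary prefix map; same return value.

-- ===== PORT A =====
-- Literal port of A.  `del m_CommentSQLLists[-1]` is `.dropLast` (split's list is never empty
-- here); `m_FormattedString + …` at pos > 0 reads the value set at pos 0, ported `.getD ""`.
def SQLFormatWithPrefix (p_szCommentSQLScript : String) (p_szOutputPrefix : String) : Option String :=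
  if PySem.Str.len p_szCommentSQLScript == 0 then none
  else
    let m_CommentSQLLists := (PySem.Str.split? p_szCommentSQLScript "\n").getD []
    let m_CommentSQLLists :=
      if PySem.Str.len p_szCommentSQLScript ≥ 1 then
        if PySem.Str.pyGet? p_szCommentSQLScript (-1) == some '\n' then m_CommentSQLLists.dropLast
        else m_CommentSQLLists
      else m_CommentSQLLists
    let st := (PySem.List.pyRange 0 (PySem.List.len m_CommentSQLLists) 1).foldl
      (fun (st : Option String × String) pos =>
        let line := PySem.List.pyGetD m_CommentSQLLists pos ""
        let m := if pos == 0 then p_szOutputPrefix ++ st.2 ++ line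
                 else (st.1.getD "") ++ "\n" ++ p_szOutputPrefix ++ st.2 ++ line
        (some m, if PySem.Str.len (PySem.Str.strip line) != 0 then "   > " else st.2))
      ((none : Option String), "SQL> ")
    st.1

-- ===== PORT B =====
-- Port of B (Source B): find the index of the first non-blank line, then prefix by index.
def SQLFormatWithPrefix_alt (p_szCommentSQLScript : String) (p_szOutputPrefix : String) : Option String :=
  if p_szCommentSQLScript == "" then none
  else
    let lines0 := (PySem.Str.split? p_szCommentSQLScript "\n").getD []
    let lines := if PySem.Str.endswith p_szCommentSQLScript "\n" then lines0.dropLast else lines0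
    let switch := (((PySem.List.enumerate lines).find?
        (fun e => PySem.Str.len (PySem.Str.strip e.2) != 0)).map (·.1)).getD (PySem.List.len lines)
    some (PySem.Str.join "\n" ((PySem.List.enumerate lines).map (fun e =>
      p_szOutputPrefix ++ (if e.1 ≤ switch then "SQL> " else "   > ") ++ e.2)))

-- ===== PRECONDITION & SPEC =====
def Spec_SQLFormatWithPrefix (p_szCommentSQLScript : String) (p_szOutputPrefix : String) (out : Option String) : Prop := out = SQLFormatWithPrefix_alt p_szCommentSQLScript p_szOutputPrefix
instance (p_szCommentSQLScript : String) (p_szOutputPrefix : String) (out : Option String) : Decidable (Spec_SQLFormatWithPrefix p_szCommentSQLScript p_szOutputPrefix out) := by unfold Spec_SQLFormatWithPrefix; infer_instance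

-- ===== CLAIM (what is proved, stated in full; the proofs are below) =====
def Claim_equal_SQLFormatWithPrefix : Prop := ∀ (p_szCommentSQLScript : String) (p_szOutputPrefix : String), Dom_SQLFormatWithPrefix p_szCommentSQLScript p_szOutputPrefix → Spec_SQLFormatWithPrefix p_szCommentSQLScript p_szOutputPrefix (SQLFormatWithPrefix p_szCommentSQLScript p_szOutputPrefix)

-- ===== LEMMAS AND PROOFS =====

-- `line is non-blank` test as both ports write it
def pvNB (l : String) : Bool := PySem.Str.len (PySem.Str.strip l) != 0

-- reference prefixed line list: flag = `a non-blank line was already seen`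
def pvGoB (q : String) (flag : Bool) : List String → List String
  | [] => []
  | l :: ls => (q ++ (if flag then "   > " else "SQL> ") ++ l) :: pvGoB q (flag || pvNB l) ls

-- continuation of a '\n'-join after its first element
def pvJoinCont : List String → String
  | [] => ""
  | x :: xs => "\n" ++ x ++ pvJoinCont xs

theorem pv_go_len (sep : List Char) : ∀ (fuel : Nat) (l cur : List Char) (acc : List (List Char)),
    acc.length + 1 ≤ (PySem.Chars.splitOn.go sep fuel l cur acc).length := by
  intro fuel
  induction fuel with
  | zero => intro l cur acc; rw [PySem.Chars.splitOn.go]; simp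
  | succ n ih =>
    intro l cur acc
    cases l with
    | nil => rw [PySem.Chars.splitOn.go] <;> simp
    | cons c rest =>
      rw [PySem.Chars.splitOn.go]
      split
      · exact le_trans (by simp) (ih _ _ _)
      · exact ih _ _ _

theorem pv_go_len2 (sep : List Char) (hsep : sep ≠ []) :
    ∀ (fuel : Nat) (l cur : List Char) (acc : List (List Char)),
    l.length < fuel → sep <:+ l →
    acc.length + 2 ≤ (PySem.Chars.splitOn.go sep fuel l cur acc).length := by
  intro fuel
  induction fuel with
  | zero => intro l cur acc h; omega
  | succ n ih =>
    intro l cur acc hlen hsuf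
    cases l with
    | nil => exact absurd (List.suffix_nil.mp hsuf) hsep
    | cons c rest =>
      rw [PySem.Chars.splitOn.go]
      split
      · exact le_trans (by simp) (pv_go_len sep n _ _ _)
      · rename_i hnp
        rcases List.suffix_cons_iff.mp hsuf with h | h
        · subst h; simp [List.isPrefixOf_iff_prefix] at hnp
        · exact ih rest (c :: cur) acc (by simpa using Nat.lt_of_succ_lt_succ hlen) h

theorem pv_splitOn_ne_nil (s sep : List Char) : PySem.Chars.splitOn s sep ≠ [] := by
  have := pv_go_len sep (s.length + 1) s [] []
  intro h
  rw [PySem.Chars.splitOn] at h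
  rw [h] at this
  simp at this

theorem pv_splitOn_len2 (s sep : List Char) (hsep : sep ≠ []) (h : sep <:+ s) :
    2 ≤ (PySem.Chars.splitOn s sep).length := by
  have := pv_go_len2 sep hsep (s.length + 1) s [] [] (by omega) h
  simpa [PySem.Chars.splitOn] using this

theorem pv_getLast?_suffix (l : List Char) (c : Char) : l.getLast? = some c ↔ [c] <:+ l := by
  constructor
  · intro h
    have hne : l ≠ [] := by rintro rfl; simp at h
    have hdl := List.dropLast_append_getLast hne
    refine ⟨l.dropLast, ?_⟩
    rw [List.getLast?_eq_some_getLast hne] at h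
    simpa [Option.some_inj.mp h] using hdl
  · rintro ⟨t, rfl⟩
    simp

theorem pv_join_cons (x : String) (xs : List String) :
    PySem.Str.join "\n" (x :: xs) = x ++ pvJoinCont xs := by
  induction xs generalizing x with
  | nil => rw [← String.toList_inj]; simp [PySem.Str.join, PySem.Chars.join, List.intercalate, pvJoinCont]
  | cons y ys ih =>
    rw [← String.toList_inj]
    have hih := congrArg String.toList (ih y)
    simp [PySem.Str.join, PySem.Chars.join, List.intercalate] at hih ⊢
    simp [pvJoinCont, hih]

theorem pv_foldA (q : String) : ∀ (ls : List String) (m : String) (flag : Bool),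
    (ls.foldl (fun (st : Option String × String) line =>
        (some ((st.1.getD "") ++ "\n" ++ q ++ st.2 ++ line),
         if PySem.Str.len (PySem.Str.strip line) != 0 then "   > " else st.2))
      (some m, if flag then "   > " else "SQL> ")).1
    = some (m ++ pvJoinCont (pvGoB q flag ls)) := by
  intro ls
  induction ls with
  | nil => intro m flag; simp [pvGoB, pvJoinCont]
  | cons l t ih =>
    intro m flag
    have hstep :
        ((some (((some m : Option String), (if flag then "   > " else "SQL> ")).1.getD "" ++ "\n" ++ q ++ ((some m : Option String), (if flag then "   > " else "SQL> ")).2 ++ l),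
          if PySem.Str.len (PySem.Str.strip l) != 0 then "   > " else ((some m : Option String), (if flag then "   > " else "SQL> ")).2)
          : Option String × String)
        = (some (m ++ "\n" ++ q ++ (if flag then "   > " else "SQL> ") ++ l),
           if (flag || pvNB l) then "   > " else "SQL> ") := by
      cases hh : pvNB l with
      | true => simp only [pvNB] at hh; rw [hh]; simp
      | false => simp only [pvNB] at hh; rw [hh]; cases flag <;> simp
    rw [List.foldl_cons, hstep, ih]
    rw [pvGoB]
    simp only [pvJoinCont]
    simp [String.append_assoc]

def pvSwB (ls : List String) (s : Int) : Int :=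
  (((PySem.List.enumerate ls s).find?
      (fun e => PySem.Str.len (PySem.Str.strip e.2) != 0)).map (·.1)).getD (s + ls.length)

theorem pvSwB_cons (l : String) (t : List String) (s : Int) :
    pvSwB (l :: t) s = if pvNB l then s else pvSwB t (s + 1) := by
  simp only [pvSwB, PySem.List.enumerate_cons, List.find?_cons]
  cases hh : pvNB l with
  | true =>
    simp only [pvNB] at hh
    simp only [hh]
    rfl
  | false =>
    simp only [pvNB] at hh
    simp only [hh]
    have h1 : s + ((t.length : Int) + 1) = s + 1 + (t.length : Int) := by ring
    simp only [List.length_cons]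
    push_cast
    rw [h1]

theorem pv_sw_ge : ∀ (ls : List String) (s : Int), s ≤ pvSwB ls s := by
  intro ls
  induction ls with
  | nil => intro s; simp [pvSwB, PySem.List.enumerate]
  | cons l t ih =>
    intro s
    rw [pvSwB_cons]
    split
    · exact le_refl s
    · have := ih (s + 1); omega

theorem pv_goB_true (q : String) : ∀ ls, pvGoB q true ls = ls.map (fun l => q ++ "   > " ++ l) := by
  intro ls; induction ls with
  | nil => simp [pvGoB]
  | cons l t ih => simp [pvGoB, ih]

theorem pv_mapB (q : String) : ∀ (ls : List String) (s : Int),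
    (PySem.List.enumerate ls s).map (fun e =>
        q ++ (if e.1 ≤ pvSwB ls s then "SQL> " else "   > ") ++ e.2)
    = pvGoB q false ls := by
  intro ls
  induction ls with
  | nil => intro s; simp [PySem.List.enumerate, pvGoB]
  | cons l t ih =>
    intro s
    rw [pvSwB_cons]
    cases h : pvNB l with
    | true =>
      simp only [h, if_true, PySem.List.enumerate_cons, List.map_cons, le_refl]
      rw [pvGoB]
      simp only [h, Bool.or_true, Bool.false_eq_true, if_false, List.cons.injEq]
      refine ⟨trivial, ?_⟩
      rw [pv_goB_true]
      have hcg : ∀ e ∈ PySem.List.enumerate t (s+1),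
          (q ++ (if e.1 ≤ s then "SQL> " else "   > ") ++ e.2) = q ++ "   > " ++ e.2 := by
        intro e he
        rcases (PySem.List.mem_enumerate_iff t (s+1) e).mp he with ⟨k, hk, rfl⟩
        have : ¬ (s + 1 + (k:Int) ≤ s) := by omega
        simp [this]
      rw [List.map_congr_left hcg]
      conv_rhs => rw [← PySem.List.map_snd_enumerate t (s+1)]
      rw [List.map_map]
      exact List.map_congr_left (fun e _ => rfl)
    | false =>
      simp only [h, Bool.false_eq_true, if_false, PySem.List.enumerate_cons, List.map_cons]
      rw [pvGoB]
      have hge := pv_sw_ge t (s+1)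
      rw [if_pos (by omega : s ≤ pvSwB t (s+1))]
      simp only [h, Bool.or_false, Bool.false_eq_true, if_false, List.cons.injEq]
      exact ⟨trivial, ih (s+1)⟩

-- the two ports agree once both are looking at the same (non-empty) list of lines
theorem pv_core (q l0 : String) (rest : List String) :
    ((PySem.List.pyRange 0 (PySem.List.len (l0 :: rest)) 1).foldl
      (fun (st : Option String × String) pos =>
        let line := PySem.List.pyGetD (l0 :: rest) pos ""
        let m := if pos == 0 then q ++ st.2 ++ line
                 else (st.1.getD "") ++ "\n" ++ q ++ st.2 ++ line
        (some m, if PySem.Str.len (PySem.Str.strip line) != 0 then "   > " else st.2))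
      ((none : Option String), "SQL> ")).1
    = some (PySem.Str.join "\n" ((PySem.List.enumerate (l0 :: rest)).map (fun e =>
        q ++ (if e.1 ≤ ((((PySem.List.enumerate (l0 :: rest)).find?
            (fun e => PySem.Str.len (PySem.Str.strip e.2) != 0)).map (·.1)).getD
            (PySem.List.len (l0 :: rest))) then "SQL> " else "   > ") ++ e.2))) := by
  -- right-hand side
  have hmapB : (PySem.List.enumerate (l0 :: rest)).map (fun e =>
      q ++ (if e.1 ≤ ((((PySem.List.enumerate (l0 :: rest)).find?
          (fun e => PySem.Str.len (PySem.Str.strip e.2) != 0)).map (·.1)).getD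
          (PySem.List.len (l0 :: rest))) then "SQL> " else "   > ") ++ e.2)
      = pvGoB q false (l0 :: rest) := by
    have h := pv_mapB q (l0 :: rest) 0
    simp only [pvSwB, zero_add] at h
    simpa [PySem.List.len] using h
  rw [hmapB]
  rw [pvGoB]
  simp only [Bool.false_or, Bool.false_eq_true, if_false]
  rw [pv_join_cons]
  have hlen : (0:Int) < PySem.List.len (l0 :: rest) := by
    simp [PySem.List.len]
  rw [PySem.List.pyRange_one_cons hlen, List.foldl_cons]
  simp only [PySem.List.pyGetD_zero_cons, beq_self_eq_true, if_true, Option.getD_some, zero_add]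
  rw [PySem.List.foldl_congr_mem _ _
      (fun (st : Option String × String) pos =>
        (some ((st.1.getD "") ++ "\n" ++ q ++ st.2 ++ (PySem.List.pyGetD (l0 :: rest) pos "")),
         if PySem.Str.len (PySem.Str.strip (PySem.List.pyGetD (l0 :: rest) pos "")) != 0 then "   > " else st.2))
      _ ?hfg]
  case hfg =>
    intro acc pos hpos
    have h1 : (1:Int) ≤ pos := (PySem.List.mem_pyRange_one.mp hpos).1
    have h0 : (pos == 0) = false := by simp; omega
    simp only [h0, Bool.false_eq_true, if_false]
  rw [PySem.List.foldl_pyRange_pyGetD (l0 :: rest) ""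
      (fun (st : Option String × String) line =>
        (some ((st.1.getD "") ++ "\n" ++ q ++ st.2 ++ line),
         if PySem.Str.len (PySem.Str.strip line) != 0 then "   > " else st.2))
      _ (by norm_num : (0:Int) ≤ 1)]
  have hdrop : List.drop (1:Int).toNat (l0 :: rest) = rest := by simp
  rw [hdrop]
  rw [show (if PySem.Str.len (PySem.Str.strip l0) != 0 then "   > " else "SQL> ")
        = (if pvNB l0 then "   > " else "SQL> ") from rfl]
  rw [pv_foldA q rest (q ++ "SQL> " ++ l0) (pvNB l0)]

-- ===== VERDICT (by name: the statement is the Claim_ definition above) =====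
theorem pv_toList_nl : "\n".toList = ['\n'] := by decide

theorem SQLFormatWithPrefix_spec : Claim_equal_SQLFormatWithPrefix := by
  intro p q _
  unfold Spec_SQLFormatWithPrefix
  by_cases hp : p = ""
  · subst hp
    simp [SQLFormatWithPrefix, SQLFormatWithPrefix_alt, PySem.Str.len]
  · have htl : p.toList ≠ [] := by
      simp [String.toList_eq_nil_iff, hp]
    have hlenf : (PySem.Str.len p == 0) = false := by
      simp [PySem.Str.len, List.length_eq_zero_iff, String.toList_eq_nil_iff, hp]
    have hge1 : PySem.Str.len p ≥ 1 := by
      simp only [PySem.Str.len]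
      have : p.toList.length ≠ 0 := by simpa [List.length_eq_zero_iff] using htl
      omega
    have hbeqf : (p == "") = false := by simp [hp]
    -- trailing-newline tests agree
    have hc : (PySem.Str.pyGet? p (-1) == some '\n') = PySem.Str.endswith p "\n" := by
      have h1 : PySem.Str.pyGet? p (-1) = p.toList.getLast? := by
        simp [PySem.Str.pyGet?, PySem.Chars.pyGet?_eq_listPyGet?, PySem.List.pyGet?_neg_one]
      rw [Bool.eq_iff_iff, h1]
      simp only [beq_iff_eq, PySem.Str.endswith, PySem.Chars.endswith_iff, pv_toList_nl]
      exact pv_getLast?_suffix _ _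
    -- the list of lines
    have hsplit : (PySem.Str.split? p "\n").getD []
        = (PySem.Chars.splitOn p.toList ['\n']).map String.ofList := by
      simp [PySem.Str.split?, PySem.Chars.split?, pv_toList_nl]
    by_cases hnl : PySem.Str.endswith p "\n" = true
    · -- trailing newline: drop the last (empty) piece; at least one line remains
      have hsuf : ['\n'] <:+ p.toList := by
        have := hnl
        simp only [PySem.Str.endswith, PySem.Chars.endswith_iff, pv_toList_nl] at this
        exact this
      have hlen2 : 2 ≤ (PySem.Chars.splitOn p.toList ['\n']).length := pv_splitOn_len2 _ _ (by simp) hsuf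
      have hne : ((PySem.Str.split? p "\n").getD []).dropLast ≠ [] := by
        rw [hsplit]
        intro h
        have := congrArg List.length h
        simp [List.length_dropLast] at this
        omega
      rcases List.exists_cons_of_ne_nil hne with ⟨l0, rest, hL⟩
      simp only [SQLFormatWithPrefix, SQLFormatWithPrefix_alt, hlenf, hbeqf, hc, hnl,
        if_pos hge1, Bool.false_eq_true, if_false, if_true, hL]
      exact pv_core q l0 rest
    · have hne : (PySem.Str.split? p "\n").getD [] ≠ [] := by
        rw [hsplit]
        intro h
        have := congrArg List.length h
        simp at this
        exact pv_splitOn_ne_nil _ _ this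
      rcases List.exists_cons_of_ne_nil hne with ⟨l0, rest, hL⟩
      have hnl' : PySem.Str.endswith p "\n" = false := by
        rw [Bool.not_eq_true] at hnl; exact hnl
      simp only [SQLFormatWithPrefix, SQLFormatWithPrefix_alt, hlenf, hbeqf, hc, hnl',
        if_pos hge1, Bool.false_eq_true, if_false, if_true, hL]
      exact pv_core q l0 rest
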